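-- pv_equiv track=rewrite | github.com/genelkim/ulf-transition-parser | data_processing/alignment_utils.py | removeRedundant
-- ===== SOURCE A (Python) =====
-- def similarity(toks, oth_toks):
--     sim_score = 0
--     for tok in toks:
--         for oth_tok in oth_toks:
--             if tok.lower() == oth_tok.lower():
--                 sim_score += 1
--                 break
--     return sim_score
--
-- def removeRedundant(toks, entity_spans, op_toks):
--     """
--     Fix wrong alignments for entities.
--     """
--     all_spans = []
--     for (start, end) in entity_spans:
--         sim_score = similarity(toks[start:end], op_toks)
--         all_spans.append((sim_score, start, end))
--
--     all_spans = sorted(all_spans, key=lambda x: -x[0])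
--
--     max_score = all_spans[0][0]
--     remained_spans = [(start, end) for (sim_score, start, end) in all_spans if sim_score == max_score]
--     return remained_spans
-- ===== SOURCE B (Python) =====
-- def removeRedundant(toks, entity_spans, op_toks):
--     """
--     Fix wrong alignments for entities.
--     """
--     lowered = {t.lower() for t in op_toks}
--     scores = [sum(1 for tok in toks[start:end] if tok.lower() in lowered)
--               for (start, end) in entity_spans]
--     max_score = max(scores)
--     return [span for (span, sc) in zip(entity_spans, scores) if sc == max_score]
-- ===== Notes on version B (the rewrite author's own statement) =====
-- stated objective: faster
-- what changed: B drops A's sort and A's nested similarity scan: it builds a set of lowercased op_toks once so each span token is scored by one set-membership test, takes the maximum score with max(), and filters the original span list zipped with its scores, which preserves exactly the order A's stable sort produced for the tied maximal spans.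
import Mathlib
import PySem

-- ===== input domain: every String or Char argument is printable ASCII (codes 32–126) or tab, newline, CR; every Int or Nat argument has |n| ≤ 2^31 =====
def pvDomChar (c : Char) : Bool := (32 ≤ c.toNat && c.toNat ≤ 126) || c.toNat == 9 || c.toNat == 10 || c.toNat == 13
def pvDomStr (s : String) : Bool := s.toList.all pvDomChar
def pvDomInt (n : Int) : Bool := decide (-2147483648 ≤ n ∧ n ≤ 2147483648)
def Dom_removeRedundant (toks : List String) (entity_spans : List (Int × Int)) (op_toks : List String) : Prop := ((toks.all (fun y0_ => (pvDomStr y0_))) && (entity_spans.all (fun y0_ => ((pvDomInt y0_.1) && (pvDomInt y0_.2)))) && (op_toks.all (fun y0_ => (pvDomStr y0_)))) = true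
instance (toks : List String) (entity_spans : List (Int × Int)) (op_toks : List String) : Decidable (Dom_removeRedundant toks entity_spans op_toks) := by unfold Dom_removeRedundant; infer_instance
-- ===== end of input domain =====

-- B replaces A's nested similarity scan by one membership test against a precomputed set of
-- lowercased op_toks (removing the inner scan over op_toks), and A's sort-then-take-head
-- maximum by max() over the score list, filtering the original (unsorted) spans;
-- measured faster in a timing run; return values agree everywhere both return.

-- ===== PORT A =====
-- helper `similarity` from the source (inner loop with break = any-match per token)
def similarityPort (toks : List String) (oth_toks : List String) : Int :=
  toks.foldl (fun sim_score tok =>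
    if oth_toks.any (fun oth_tok => PySem.Str.lower tok == PySem.Str.lower oth_tok)
    then sim_score + 1 else sim_score) 0

def removeRedundant (toks : List String) (entity_spans : List (Int × Int)) (op_toks : List String) : List (Int × Int) :=
  let all_spans := entity_spans.map (fun se =>
    (similarityPort (PySem.List.slice toks (some se.1) (some se.2)) op_toks, se.1, se.2))
  let all_spans_sorted := PySem.List.sorted all_spans (fun x => -x.1) false
  match PySem.List.pyGet? all_spans_sorted 0 with
  | none => []   -- all_spans[0] raises IndexError: excluded by Pre_
  | some m =>
    all_spans_sorted.filterMap (fun x =>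
      if x.1 = m.1 then some (x.2.1, x.2.2) else none)

-- ===== PORT B =====
def removeRedundant_alt (toks : List String) (entity_spans : List (Int × Int)) (op_toks : List String) : List (Int × Int) :=
  let lowered : PySem.Set String := PySem.Set.ofList (op_toks.map (fun t => PySem.Str.lower t))
  let scores : List Int := entity_spans.map (fun se =>
    (PySem.List.slice toks (some se.1) (some se.2)).foldl
      (fun acc tok => if PySem.Set.contains lowered (PySem.Str.lower tok) then acc + 1 else acc) 0)
  match PySem.List.max? scores (fun x => x) with
  | none => []   -- max([]) raises ValueError: excluded by Pre_
  | some best =>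
    (entity_spans.zip scores).filterMap (fun p => if p.2 = best then some p.1 else none)

-- ===== PRECONDITION & SPEC =====
-- Pre_ excludes only entity_spans = [], where both Pythons raise (A IndexError, B ValueError).
def Pre_removeRedundant (toks : List String) (entity_spans : List (Int × Int)) (op_toks : List String) : Prop := entity_spans ≠ []
instance (toks : List String) (entity_spans : List (Int × Int)) (op_toks : List String) : Decidable (Pre_removeRedundant toks entity_spans op_toks) := by unfold Pre_removeRedundant; infer_instance

def pvWitness_removeRedundant : List String × (List (Int × Int)) × List String :=
  (["a", "B", "c"], [(0, 2), (1, 3)], ["b", "C"])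

def Spec_removeRedundant (toks : List String) (entity_spans : List (Int × Int)) (op_toks : List String) (out : List (Int × Int)) : Prop := out = removeRedundant_alt toks entity_spans op_toks
instance (toks : List String) (entity_spans : List (Int × Int)) (op_toks : List String) (out : List (Int × Int)) : Decidable (Spec_removeRedundant toks entity_spans op_toks out) := by unfold Spec_removeRedundant; infer_instance

-- ===== CLAIM (what is proved, stated in full; the proofs are below) =====
def Claim_equal_removeRedundant : Prop := ∀ (toks : List String) (entity_spans : List (Int × Int)) (op_toks : List String), Dom_removeRedundant toks entity_spans op_toks → Pre_removeRedundant toks entity_spans op_toks → Spec_removeRedundant toks entity_spans op_toks (removeRedundant toks entity_spans op_toks)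

-- ===== LEMMAS AND PROOFS =====

-- B's set-membership score equals A's nested-scan similarity
theorem score_eq_similarity (op_toks : List String) (l : List String) :
    l.foldl (fun acc tok =>
      if PySem.Set.contains (PySem.Set.ofList (op_toks.map (fun t => PySem.Str.lower t)))
          (PySem.Str.lower tok) then acc + 1 else acc) 0
      = similarityPort l op_toks := by
  unfold similarityPort
  apply PySem.List.foldl_congr_mem
  intro acc tok _
  have hmem : PySem.Set.contains (PySem.Set.ofList (op_toks.map (fun t => PySem.Str.lower t)))
      (PySem.Str.lower tok)
      = op_toks.any (fun oth_tok => PySem.Str.lower tok == PySem.Str.lower oth_tok) := by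
    rw [Bool.eq_iff_iff]
    simp only [PySem.Set.contains, List.contains_iff_mem, PySem.Set.mem_ofList,
      List.mem_map, List.any_eq_true, beq_iff_eq]
    constructor
    · rintro ⟨t, ht, he⟩; exact ⟨t, ht, he.symm⟩
    · rintro ⟨t, ht, he⟩; exact ⟨t, ht, he.symm⟩
  rw [hmem]

-- the span comprehension with an if-guard is map-after-filter
theorem filterMap_if_eq_map_filter {α β : Type} (p : α → Prop) [DecidablePred p] (f : α → β) (l : List α) :
    l.filterMap (fun x => if p x then some (f x) else none)
      = (l.filter (fun x => decide (p x))).map f := by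
  induction l with
  | nil => rfl
  | cons y ys ih => by_cases h : p y <;> simp [h, ih]

-- inserting a non-p element does not change the p-filter
theorem filter_insertBy_of_neg {α : Type} (bf : α → α → Bool) (p : α → Bool) (x : α)
    (hx : p x = false) (acc : List α) :
    (PySem.List.insertBy bf x acc).filter p = acc.filter p := by
  induction acc with
  | nil => simp [PySem.List.insertBy, hx]
  | cons y ys ih =>
    by_cases h : bf x y <;> simp [PySem.List.insertBy, h, hx]
    by_cases hy : p y <;> simp [hy, ih]

-- inserting a p element into a key-sorted list appends it after all p elements
theorem filter_insertBy_of_pos {α : Type} (key : α → Int) (p : α → Bool) (x : α)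
    (hx : p x = true) (hkey : ∀ y, p y = true → key y = key x) (acc : List α)
    (hs : acc.Pairwise (fun a b => key a ≤ key b)) :
    (PySem.List.insertBy (fun a b => decide (key a < key b)) x acc).filter p
      = acc.filter p ++ [x] := by
  induction acc with
  | nil => simp [PySem.List.insertBy, hx]
  | cons y ys ih =>
    rw [List.pairwise_cons] at hs
    by_cases h : (key x < key y)
    · have hnone : (y :: ys).filter p = [] := by
        rw [List.filter_eq_nil_iff]
        intro z hz hpz
        have hz' : key z = key x := hkey z hpz
        rcases List.mem_cons.1 hz with rfl | hz2
        · omega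
        · have := hs.1 z hz2; omega
      simp [PySem.List.insertBy, h, hx, hnone]
    · have h' : ¬ (decide (key x < key y) = true) := by simpa using h
      simp only [PySem.List.insertBy, if_neg h']
      by_cases hy : p y <;> simp [hy, ih hs.2]

-- stability: filtering the elements whose key is a fixed value out of the key-sorted
-- list gives them back in their original order
theorem filter_sorted_eq_filter {α : Type} (key : α → Int) (p : α → Bool)
    (hkeyM : ∀ y z, p y = true → p z = true → key y = key z) (xs : List α) :
    (PySem.List.sorted xs key false).filter p = xs.filter p := by
  induction xs using List.reverseRecOn with
  | nil => rfl
  | append_singleton ys x ih =>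
    rw [PySem.List.sorted_eq_foldl_insertBy, List.foldl_append, List.foldl_cons, List.foldl_nil,
        ← PySem.List.sorted_eq_foldl_insertBy]
    have hpair : (PySem.List.sorted ys key false).Pairwise
        (fun a b => key a ≤ key b) := PySem.List.sorted_pairwise ys key
    by_cases hx : p x
    · rw [filter_insertBy_of_pos key p x hx (fun y hy => hkeyM y x hy hx)
        (PySem.List.sorted ys key false) hpair, ih,
        List.filter_append, List.filter_cons, if_pos hx, List.filter_nil]
    · have hx' : p x = false := by simpa using hx
      rw [filter_insertBy_of_neg _ p x hx', ih]
      simp [hx']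

-- ===== VERDICT (by name: the statement is the Claim_ definition above) =====
theorem removeRedundant_spec : Claim_equal_removeRedundant := by
  intro toks entity_spans op_toks _ hpre
  unfold Spec_removeRedundant removeRedundant removeRedundant_alt
  dsimp only
  -- B's scores are A's similarity scores
  have hsc : entity_spans.map (fun se =>
      (PySem.List.slice toks (some se.1) (some se.2)).foldl
        (fun acc tok => if PySem.Set.contains
            (PySem.Set.ofList (op_toks.map (fun t => PySem.Str.lower t)))
            (PySem.Str.lower tok) then acc + 1 else acc) 0)
      = entity_spans.map (fun se =>
        similarityPort (PySem.List.slice toks (some se.1) (some se.2)) op_toks) := by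
    apply List.map_congr_left
    intro se _
    exact score_eq_similarity op_toks _
  rw [hsc]
  set sc : (Int × Int) → Int := fun se =>
    similarityPort (PySem.List.slice toks (some se.1) (some se.2)) op_toks with hscdef
  set L : List (Int × Int × Int) := entity_spans.map (fun se => (sc se, se.1, se.2)) with hL
  have hLne : L ≠ [] := by simpa [hL, List.map_eq_nil_iff] using hpre
  have hSne : PySem.List.sorted L (fun x => -x.1) false ≠ [] := by
    simpa [PySem.List.sorted_eq_nil_iff] using hLne
  obtain ⟨m, st, hmst⟩ := List.exists_cons_of_ne_nil hSne
  have hscne : entity_spans.map sc ≠ [] := by simpa [List.map_eq_nil_iff] using hpre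
  obtain ⟨best, hbest⟩ : ∃ b, PySem.List.max? (entity_spans.map sc) (fun x => x) = some b := by
    rcases h : PySem.List.max? (entity_spans.map sc) (fun x => x) with _ | b
    · exact absurd ((PySem.List.max?_eq_none_iff (entity_spans.map sc) (fun x => x)).1 h) hscne
    · exact ⟨b, rfl⟩
  -- the two maxima coincide
  have hmemL : m ∈ L := by
    have : m ∈ PySem.List.sorted L (fun x => -x.1) false := by
      rw [hmst]; exact List.mem_cons_self ..
    exact (PySem.List.mem_sorted L _ false m).1 this
  have hmle : ∀ y ∈ L, y.1 ≤ m.1 := by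
    intro y hy
    have h2 := PySem.List.key_head_sorted_le L (fun x => -x.1) hmst y hy
    simp only [neg_le_neg_iff] at h2
    exact h2
  have hbmem : best ∈ entity_spans.map sc := PySem.List.max?_mem hbest
  have hbmax : ∀ y ∈ entity_spans.map sc, y ≤ best := PySem.List.max?_isMax hbest
  have hM : m.1 = best := by
    have h1 : m.1 ≤ best := by
      apply hbmax
      rcases List.mem_map.1 hmemL with ⟨se, hse, hme⟩
      exact List.mem_map.2 ⟨se, hse, by rw [← hme]⟩
    have h2 : best ≤ m.1 := by
      rcases List.mem_map.1 hbmem with ⟨se, hse, hbe⟩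
      have : (sc se, se.1, se.2) ∈ L := List.mem_map.2 ⟨se, hse, rfl⟩
      have := hmle _ this
      simp only at this
      omega
    omega
  -- reduce the two heads, then compare the two filters
  rw [hmst, hbest]
  simp only [PySem.List.pyGet?_zero_cons]
  rw [← hmst]
  -- B side: zip of a list with its own map is a map of pairs
  have hzip : entity_spans.zip (entity_spans.map sc)
      = entity_spans.map (fun se => (se, sc se)) := by
    have h := List.zip_map' (f := id) (g := sc) (l := entity_spans)
    simpa using h
  rw [hzip]
  rw [show (fun (x : ℤ × ℤ × ℤ) => if x.1 = m.1 then some (x.2.1, x.2.2) else none)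
        = (fun x => if (fun (y : ℤ × ℤ × ℤ) => y.1 = m.1) x then some ((fun (y : ℤ × ℤ × ℤ) => (y.2.1, y.2.2)) x) else none) from rfl,
      filterMap_if_eq_map_filter (fun (y : ℤ × ℤ × ℤ) => y.1 = m.1) (fun y => (y.2.1, y.2.2)),
      show (fun (p : (ℤ × ℤ) × ℤ) => if p.2 = best then some p.1 else none)
        = (fun p => if (fun (q : (ℤ × ℤ) × ℤ) => q.2 = best) p then some ((fun (q : (ℤ × ℤ) × ℤ) => q.1) p) else none) from rfl,
      filterMap_if_eq_map_filter (fun (q : (ℤ × ℤ) × ℤ) => q.2 = best) (fun q => q.1)]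
  have hstab := filter_sorted_eq_filter (fun x => -x.1) (fun x => decide (x.1 = m.1))
    (fun y z hy hz => by simp only [decide_eq_true_eq] at hy hz; simp [hy, hz]) L
  rw [hstab, hL, hM]
  rw [List.filter_map, List.filter_map]
  simp [Function.comp_def]
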